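-- pv_equiv track=rewrite | github.com/igor-marinescu/pclp_juliet_a | scripts/reduced.py | generate_issues_colors
-- ===== SOURCE A (Python) =====
-- def generate_issues_colors(issues_dict, cl_list):
--     """ Create a dictionary with unique colors for issues.
--     issues_dict - dictionary containing issue-names (als keys) and issue-count.
--             Example: {"w746":10, "i2707":3, "i793":15, "e838":3, ... }
--     cl_list - a list of list of colors - every element of cl_list is a list of colors.
--             Example: [  ["sandybrown", "darkorange", "orange", ...],
--                         ["plum", "pink", "thistle", "orchid", ...],
--                         ["powderblue", "skyblue", "lightsteelblue", ...]
--                         ...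
--                      ]
--     The function sorts all issues by the values - issues with bigger count are first,
--     issues with smaller count are last. Every issue is assigned a unique color.
--     The colors a selected one by one from every list:
--             cl_list[0][0], cl_list[1][0], cl_list[2][0], ..., cl_list[N][0],
--             cl_list[0][1], cl_list[1][1], cl_list[2][1], ..., cl_list[N][1]
--             ...
--     The results are stored in a dictionary.
--             Example: { "i793":"sandybrown", "w746":"plum", "i2707":"powderblue", ...}
--     """
--
--     cl_list_cnt = len(cl_list)
--     cl_list_idx = [0] * cl_list_cnt
--     cl_list_act = 0
--
--     issues_colors = {}
--
--     # Sort the slices dictionary based on values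
--     issues_sorted_list = sorted(issues_dict.items(), key=lambda x: x[1], reverse = True)
--     # This generates a sorted list of tuples: [(<slice_name>, <slice_val>),...]
--     # Example: [("i793", 15), ("w746", 10), ("i2707", 3), ("e838", 3), ... ]
--
--     for issue_t in issues_sorted_list:
--         col = None
--         col = cl_list[cl_list_act][cl_list_idx[cl_list_act]]
--         cl_list_idx[cl_list_act] += 1
--         if cl_list_idx[cl_list_act] >= len(cl_list[cl_list_act]):
--             cl_list_idx[cl_list_act] = 0
--         cl_list_act += 1
--         if cl_list_act >= cl_list_cnt:
--             cl_list_act = 0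
--
--         issues_colors[issue_t[0]] = col
--
--     return issues_colors
-- ===== SOURCE B (Python) =====
-- def generate_issues_colors(issues_dict, cl_list):
--     """Chunked-rounds construction: sort the issue names once, then hand out colors
--     round by round — each round zips the pending names with the palette list, takes
--     every palette's current head, and rotates each palette one step for the next
--     round (no index counters are kept)."""
--     names = [name for name, _ in sorted(issues_dict.items(), key=lambda x: x[1], reverse=True)]
--     palettes = list(cl_list)
--     issues_colors = {}
--     while names and palettes:
--         for name, group in zip(names, palettes):
--             issues_colors[name] = group[0]
--         names = names[len(palettes):]
--         palettes = [g[1:] + g[:1] for g in palettes]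
--     return issues_colors
-- ===== Notes on version B (the rewrite author's own statement) =====
-- stated objective: alternative
-- what changed: Instead of a per-issue loop maintaining an active-palette pointer and per-palette index counters, B sorts once, then distributes colors in rounds: each round zips the pending names with the palette list and takes every palette's head, then rotates each palette one step; no indices are kept.
import Mathlib
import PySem

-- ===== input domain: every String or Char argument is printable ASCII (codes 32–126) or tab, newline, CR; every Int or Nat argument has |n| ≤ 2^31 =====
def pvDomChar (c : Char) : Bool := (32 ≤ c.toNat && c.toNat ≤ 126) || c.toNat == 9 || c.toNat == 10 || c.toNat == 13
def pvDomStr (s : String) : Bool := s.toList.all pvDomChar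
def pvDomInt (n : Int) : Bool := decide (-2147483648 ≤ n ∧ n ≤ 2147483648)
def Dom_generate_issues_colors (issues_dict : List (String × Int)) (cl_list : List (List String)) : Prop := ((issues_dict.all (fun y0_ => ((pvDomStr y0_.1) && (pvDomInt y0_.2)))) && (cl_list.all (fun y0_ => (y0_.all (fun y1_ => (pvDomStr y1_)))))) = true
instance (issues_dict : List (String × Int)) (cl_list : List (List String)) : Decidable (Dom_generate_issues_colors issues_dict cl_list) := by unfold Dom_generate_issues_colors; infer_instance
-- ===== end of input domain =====

-- B replaces A's per-issue loop with maintained index counters / active-list pointer by a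
-- chunked rounds construction: zip the pending names with the palettes, take heads, rotate
-- the palettes (objective: alternative).


-- ===== PORT A =====
-- A's for-loop over the sorted issues, carrying the mutable state (cl_list_idx, cl_list_act,
-- issues_colors); `none` = IndexError (empty cl_list / an empty reached sub-list).
def pvALoop (cl_list : List (List String)) (L : List (String × Int)) (cl_list_idx : List Int)
    (cl_list_act : Int) (issues_colors : PySem.Dict String String) :
    Option (PySem.Dict String String) :=
  match L with
  | [] => some issues_colors
  | issue_t :: rest =>
    match PySem.List.pyGet? cl_list cl_list_act with
    | none => none
    | some group =>
      match PySem.List.pyGet? cl_list_idx cl_list_act with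
      | none => none
      | some i =>
        match PySem.List.pyGet? group i with
        | none => none
        | some col =>
          let i1 : Int := i + 1
          let i2 : Int := if i1 ≥ (group.length : Int) then 0 else i1
          let idx' := PySem.List.pySetD cl_list_idx cl_list_act i2
          let act1 : Int := cl_list_act + 1
          let act2 : Int := if act1 ≥ (cl_list.length : Int) then 0 else act1
          pvALoop cl_list rest idx' act2 (issues_colors.insert issue_t.1 col)

def generate_issues_colors (issues_dict : List (String × Int)) (cl_list : List (List String)) : List (String × String) :=
  let issues_sorted_list := PySem.List.sorted issues_dict (fun x => x.2) true
  ((pvALoop cl_list issues_sorted_list (List.replicate cl_list.length 0) 0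
      PySem.Dict.empty).getD PySem.Dict.empty).items

-- ===== PORT B =====
-- B's `palettes = [g[1:] + g[:1] for g in palettes]` rotation step
def pvRot (g : List String) : List String := g.drop 1 ++ g.take 1

-- B's `while names and palettes:` loop; the Nat argument is a fuel guard only (the loop
-- consumes ≥ 1 name per round once palettes ≠ [], so fuel = names.length never runs out);
-- `group[0]` is ported as `.getD 0 ""` — exact whenever the accessed group is nonempty (Pre_).
def pvBLoop : Nat → List String → List (List String) → PySem.Dict String String → PySem.Dict String String
  | _, [], _, issues_colors => issues_colors
  | _, _ :: _, [], issues_colors => issues_colors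
  | 0, _ :: _, _ :: _, issues_colors => issues_colors
  | fuel + 1, nm :: names, pl :: palettes, issues_colors =>
    let d := ((nm :: names).zip (pl :: palettes)).foldl
        (fun d p => d.insert p.1 (p.2.getD 0 "")) issues_colors
    pvBLoop fuel ((nm :: names).drop (pl :: palettes).length)
        ((pl :: palettes).map pvRot) d

def generate_issues_colors_alt (issues_dict : List (String × Int)) (cl_list : List (List String)) : List (String × String) :=
  let names := (PySem.List.sorted issues_dict (fun x => x.2) true).map Prod.fst
  (pvBLoop names.length names cl_list PySem.Dict.empty).items

-- ===== PRECONDITION & SPEC =====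
-- Pre_ excludes exactly the inputs where A raises IndexError: some issues exist but cl_list
-- is empty, or an empty color sub-list is reached (sub-list j is reached iff j < #issues).
def Pre_generate_issues_colors (issues_dict : List (String × Int)) (cl_list : List (List String)) : Prop :=
  issues_dict = [] ∨ (cl_list ≠ [] ∧
    ∀ j ∈ List.range cl_list.length, j < issues_dict.length → cl_list.getD j [] ≠ [])
instance (issues_dict : List (String × Int)) (cl_list : List (List String)) : Decidable (Pre_generate_issues_colors issues_dict cl_list) := by unfold Pre_generate_issues_colors; infer_instance

def pvWitness_generate_issues_colors : (List (String × Int)) × List (List String) :=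
  ([("w746", 10), ("i2707", 3), ("i793", 15)], [["sandybrown", "darkorange"], ["plum"]])

def Spec_generate_issues_colors (issues_dict : List (String × Int)) (cl_list : List (List String)) (out : List (String × String)) : Prop := out = generate_issues_colors_alt issues_dict cl_list
instance (issues_dict : List (String × Int)) (cl_list : List (List String)) (out : List (String × String)) : Decidable (Spec_generate_issues_colors issues_dict cl_list out) := by unfold Spec_generate_issues_colors; infer_instance

-- ===== CLAIM (what is proved, stated in full; the proofs are below) =====
def Claim_equal_generate_issues_colors : Prop := ∀ (issues_dict : List (String × Int)) (cl_list : List (List String)), Dom_generate_issues_colors issues_dict cl_list → Pre_generate_issues_colors issues_dict cl_list → Spec_generate_issues_colors issues_dict cl_list (generate_issues_colors issues_dict cl_list)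

-- ===== LEMMAS AND PROOFS =====

-- number of loop steps among the first m that used sub-list j (for j < n), in closed form
def pvUses (n m j : Nat) : Nat := (m + (n - 1 - j)) / n

-- A's cl_list_idx after m steps, expressed through pvUses
def pvIdx (cl : List (List String)) (m : Nat) : List Int :=
  (List.range cl.length).map
    (fun j => ((pvUses cl.length m j % (cl.getD j []).length : Nat) : Int))

lemma pvUses_self {n m : Nat} (hn : 0 < n) : pvUses n m (m % n) = m / n := by
  have hr : m % n < n := Nat.mod_lt _ hn
  have hm : n * (m / n) + m % n = m := Nat.div_add_mod m n
  unfold pvUses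
  rw [show m + (n - 1 - m % n) = n * (m / n) + (n - 1) from by set x := n * (m / n); omega,
    Nat.mul_add_div hn, Nat.div_eq_of_lt (show n - 1 < n by omega)]
  rfl

lemma pvUses_succ_self {n m : Nat} (hn : 0 < n) : pvUses n (m + 1) (m % n) = m / n + 1 := by
  have hr : m % n < n := Nat.mod_lt _ hn
  have hm : n * (m / n) + m % n = m := Nat.div_add_mod m n
  unfold pvUses
  rw [show m + 1 + (n - 1 - m % n) = n * (m / n + 1) from by
      rw [Nat.mul_succ]; set x := n * (m / n); omega]
  exact Nat.mul_div_cancel_left _ hn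

lemma pvUses_succ_ne {n m j : Nat} (hn : 0 < n) (hj : j < n) (hne : j ≠ m % n) :
    pvUses n (m + 1) j = pvUses n m j := by
  have hr : m % n < n := Nat.mod_lt _ hn
  have hm : n * (m / n) + m % n = m := Nat.div_add_mod m n
  unfold pvUses
  rcases Nat.lt_or_ge j (m % n) with h | h
  · rw [show m + (n - 1 - j) = n * (m / n + 1) + (m % n - 1 - j) from by
        rw [Nat.mul_succ]; set x := n * (m / n); omega,
      show m + 1 + (n - 1 - j) = n * (m / n + 1) + (m % n - j) from by
        rw [Nat.mul_succ]; set x := n * (m / n); omega,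
      Nat.mul_add_div hn, Nat.mul_add_div hn,
      Nat.div_eq_of_lt (show m % n - j < n by omega),
      Nat.div_eq_of_lt (show m % n - 1 - j < n by omega)]
  · have hgt : m % n < j := by omega
    rw [show m + (n - 1 - j) = n * (m / n) + (n - 1 - (j - m % n)) from by
        set x := n * (m / n); omega,
      show m + 1 + (n - 1 - j) = n * (m / n) + (n - (j - m % n)) from by
        set x := n * (m / n); omega,
      Nat.mul_add_div hn, Nat.mul_add_div hn,
      Nat.div_eq_of_lt (show n - (j - m % n) < n by omega),
      Nat.div_eq_of_lt (show n - 1 - (j - m % n) < n by omega)]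

lemma pvIdx_zero (cl : List (List String)) : pvIdx cl 0 = List.replicate cl.length 0 := by
  apply List.ext_getElem
  · simp [pvIdx]
  · intro j h1 h2
    simp only [pvIdx, List.getElem_map, List.getElem_range, List.getElem_replicate]
    have hj : j < cl.length := by simpa [pvIdx] using h1
    have : pvUses cl.length 0 j = 0 := by
      unfold pvUses; exact Nat.div_eq_of_lt (by omega)
    simp [this]

lemma pvWrap (a g : Nat) (ha : a < g) :
    (if ((a : Int) + 1 ≥ (g : Int)) then (0 : Int) else (a : Int) + 1)
      = (((a + 1) % g : Nat) : Int) := by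
  split_ifs with h
  · have hgle : g ≤ a + 1 := by exact_mod_cast h
    have hag : a + 1 = g := by omega
    rw [hag, Nat.mod_self]
    simp
  · have hlt : a + 1 < g := by
      have : (a : Int) + 1 < (g : Int) := by omega
      exact_mod_cast this
    rw [Nat.mod_eq_of_lt hlt]
    push_cast
    ring

lemma pvIdx_succ (cl : List (List String)) (hn : 0 < cl.length) (m : Nat) :
    (pvIdx cl m).set (m % cl.length)
        ((pvUses cl.length (m + 1) (m % cl.length) % (cl.getD (m % cl.length) []).length : Nat) : Int)
      = pvIdx cl (m + 1) := by
  have hr : m % cl.length < cl.length := Nat.mod_lt _ hn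
  apply List.ext_getElem
  · simp [pvIdx]
  · intro j h1 h2
    have hj : j < cl.length := by simpa [pvIdx] using h2
    simp only [pvIdx, List.getElem_set, List.getElem_map, List.getElem_range]
    by_cases hje : m % cl.length = j
    · rw [if_pos hje, hje]
    · rw [if_neg hje, pvUses_succ_ne hn hj (fun hc => hje hc.symm)]

lemma pvLoop_eq (cl : List (List String)) (hn : 0 < cl.length) :
    ∀ (L : List (String × Int)) (m : Nat) (d : PySem.Dict String String),
    (∀ j, j < cl.length → j < m + L.length → cl.getD j [] ≠ []) →
    pvALoop cl L (pvIdx cl m) ((m % cl.length : Nat) : Int) d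
      = some ((L.zipIdx m).foldl
          (fun d p =>
            let group := cl.getD (p.2 % cl.length) []
            d.insert p.1.1 (group.getD ((p.2 / cl.length) % group.length) ""))
          d) := by
  intro L
  induction L with
  | nil => intro m d _; simp [pvALoop]
  | cons t rest ih =>
    intro m d H
    have hr : m % cl.length < cl.length := Nat.mod_lt _ hn
    have hml : m % cl.length ≤ m := Nat.mod_le m _
    have hgne : cl.getD (m % cl.length) [] ≠ [] := H _ hr (by simp only [List.length_cons]; omega)
    have hg0 : 0 < (cl.getD (m % cl.length) []).length := List.length_pos_of_ne_nil hgne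
    have h1 : PySem.List.pyGet? cl ((m % cl.length : Nat) : Int)
        = some (cl.getD (m % cl.length) []) := by
      rw [PySem.List.pyGet?_natCast, List.getElem?_eq_getElem hr,
        List.getD_eq_getElem cl [] hr]
    have h2 : PySem.List.pyGet? (pvIdx cl m) ((m % cl.length : Nat) : Int)
        = some ((pvUses cl.length m (m % cl.length)
            % (cl.getD (m % cl.length) []).length : Nat) : Int) := by
      rw [PySem.List.pyGet?_natCast]
      simp [pvIdx, hr]
    have hu : pvUses cl.length m (m % cl.length) % (cl.getD (m % cl.length) []).length
        < (cl.getD (m % cl.length) []).length := Nat.mod_lt _ hg0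
    have h3 : PySem.List.pyGet? (cl.getD (m % cl.length) [])
        ((pvUses cl.length m (m % cl.length) % (cl.getD (m % cl.length) []).length : Nat) : Int)
        = some ((cl.getD (m % cl.length) [])[pvUses cl.length m (m % cl.length)
            % (cl.getD (m % cl.length) []).length]'hu) := by
      rw [PySem.List.pyGet?_natCast, List.getElem?_eq_getElem hu]
    rw [pvALoop, h1, h2]
    dsimp only
    rw [h3]
    dsimp only
    rw [pvWrap _ _ hu, Nat.mod_add_mod, PySem.List.pySetD_natCast]
    rw [show pvUses cl.length m (m % cl.length) + 1 = pvUses cl.length (m + 1) (m % cl.length) from by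
      rw [pvUses_self hn, pvUses_succ_self hn]]
    rw [pvIdx_succ cl hn m]
    rw [pvWrap _ _ hr, Nat.mod_add_mod]
    rw [ih (m + 1) _ (fun j hj hlt => H j hj (by simp only [List.length_cons]; omega))]
    rw [List.zipIdx_cons, List.foldl_cons]
    simp only [pvUses_self hn]
    rw [List.getD_eq_getElem (cl.getD (m % cl.length) []) "" (Nat.mod_lt _ hg0)]

-- ---------- B-side: rotation characterised by indices ----------

-- g rotated k steps to the left
def pvRotN (k : Nat) (g : List String) : List String :=
  g.drop (k % g.length) ++ g.take (k % g.length)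

lemma pvRotN_zero (g : List String) : pvRotN 0 g = g := by simp [pvRotN]

lemma pvRotN_length (k : Nat) (g : List String) : (pvRotN k g).length = g.length := by
  rcases g with _ | ⟨x, t⟩
  · simp [pvRotN]
  · have : k % (x :: t).length < (x :: t).length := Nat.mod_lt _ (by simp)
    simp [pvRotN]
    omega

lemma pvRotN_getElem (k : Nat) (g : List String) (hg : g ≠ []) (i : Nat) (hi : i < g.length) :
    (pvRotN k g)[i]'(by rw [pvRotN_length]; exact hi)
      = g[(i + k % g.length) % g.length]'(Nat.mod_lt _ (List.length_pos_of_ne_nil hg)) := by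
  have hl : 0 < g.length := List.length_pos_of_ne_nil hg
  have hr : k % g.length < g.length := Nat.mod_lt _ hl
  unfold pvRotN
  by_cases h : i < g.length - k % g.length
  · rw [List.getElem_append_left (by simpa using h), List.getElem_drop]
    exact (getElem_congr_idx (by rw [Nat.mod_eq_of_lt (by omega)]; omega)).symm
  · rw [List.getElem_append_right (by simp; omega)]
    rw [List.getElem_take]
    exact (getElem_congr_idx (by
      rw [Nat.mod_eq_sub_mod (by omega), Nat.mod_eq_of_lt (by omega)]
      simp
      omega)).symm

lemma pvRot_length (g : List String) : (pvRot g).length = g.length := by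
  simp [pvRot]; omega

lemma pvRot_getElem (g : List String) (hg : g ≠ []) (i : Nat) (hi : i < g.length) :
    (pvRot g)[i]'(by rw [pvRot_length]; exact hi)
      = g[(i + 1) % g.length]'(Nat.mod_lt _ (List.length_pos_of_ne_nil hg)) := by
  have hl : 0 < g.length := List.length_pos_of_ne_nil hg
  unfold pvRot
  by_cases h : i < g.length - 1
  · rw [List.getElem_append_left (by simpa using h), List.getElem_drop]
    exact (getElem_congr_idx (by rw [Nat.mod_eq_of_lt (by omega)]; omega)).symm
  · have hi1 : i = g.length - 1 := by omega
    rw [List.getElem_append_right (by simp; omega)]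
    rw [List.getElem_take]
    exact (getElem_congr_idx (by subst hi1; rw [Nat.sub_add_cancel hl, Nat.mod_self]; simp)).symm

lemma pvRot_pvRotN (k : Nat) (g : List String) : pvRot (pvRotN k g) = pvRotN (k + 1) g := by
  rcases eq_or_ne g [] with h | h
  · subst h; simp [pvRot, pvRotN]
  · have hl : 0 < g.length := List.length_pos_of_ne_nil h
    have hne : pvRotN k g ≠ [] := by
      intro hc
      have := pvRotN_length k g
      rw [hc] at this
      simp at this
      omega
    apply List.ext_getElem
    · rw [pvRot_length, pvRotN_length, pvRotN_length]
    · intro i h1 h2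
      have hi : i < g.length := by
        rw [pvRot_length, pvRotN_length] at h1; exact h1
      have hiR : i < (pvRotN k g).length := by rw [pvRotN_length]; exact hi
      rw [pvRot_getElem (pvRotN k g) hne i hiR]
      have hlen : (pvRotN k g).length = g.length := pvRotN_length k g
      have hm : (i + 1) % (pvRotN k g).length < g.length := by
        rw [hlen]; exact Nat.mod_lt _ hl
      rw [pvRotN_getElem k g h _ (by rw [← hlen]; exact Nat.mod_lt _ (by omega))]
      rw [pvRotN_getElem (k + 1) g h i hi]
      apply getElem_congr_idx
      rw [hlen]
      conv_lhs => rw [Nat.mod_add_mod, Nat.add_mod_mod]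
      conv_rhs => rw [Nat.add_mod_mod]
      ring_nf

-- pointwise congruence of folds over two equally long lists
lemma pvFoldl_congr {α β γ : Type} (f : γ → α → γ) (g : γ → β → γ) :
    ∀ (l1 : List α) (l2 : List β), l1.length = l2.length →
    (∀ i (h1 : i < l1.length) (h2 : i < l2.length), ∀ e, f e (l1[i]'h1) = g e (l2[i]'h2)) →
    ∀ d, l1.foldl f d = l2.foldl g d := by
  intro l1
  induction l1 with
  | nil => intro l2 hlen _ d; rw [List.length_nil] at hlen; rw [List.eq_nil_of_length_eq_zero hlen.symm]; rfl
  | cons x t ih =>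
    intro l2 hlen hpt d
    rcases l2 with _ | ⟨y, t2⟩
    · simp at hlen
    · simp only [List.foldl_cons]
      have h0 := hpt 0 (by simp) (by simp) d
      simp only [List.getElem_cons_zero] at h0
      rw [h0]
      exact ih t2 (by simpa using hlen) (fun i h1 h2 e => hpt (i + 1) (by simpa using h1) (by simpa using h2) e) _

-- one round: zipping the pending names with the k-times-rotated palettes and taking heads
-- equals the closed-form coloring of the first n names at absolute positions k*n, k*n+1, …
lemma pvChunk (cl : List (List String)) (hn : 0 < cl.length) (names : List String) (k : Nat)
    (H : ∀ j, j < cl.length → j < names.length → cl.getD j [] ≠ []) (d : PySem.Dict String String) :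
    (names.zip (cl.map (pvRotN k))).foldl (fun d p => d.insert p.1 (p.2.getD 0 "")) d
      = ((names.take cl.length).zipIdx (k * cl.length)).foldl
          (fun d p =>
            let group := cl.getD (p.2 % cl.length) []
            d.insert p.1 (group.getD ((p.2 / cl.length) % group.length) "")) d := by
  apply pvFoldl_congr
  · simp [Nat.min_comm]
  · intro i h1 h2 e
    have hi : i < names.length ∧ i < cl.length := by
      simp at h1
      omega
    have hgne : cl.getD i [] ≠ [] := H i hi.2 hi.1
    have hgn : cl[i]'hi.2 ≠ [] := by rwa [List.getD_eq_getElem cl [] hi.2] at hgne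
    have hg0 : 0 < (cl[i]'hi.2).length := List.length_pos_of_ne_nil hgn
    have e1 : (names.zip (cl.map (pvRotN k)))[i]'h1
        = (names[i]'hi.1, pvRotN k (cl[i]'hi.2)) := by
      rw [List.getElem_zip]
      congr 1
      exact List.getElem_map _
    have e2 : ((names.take cl.length).zipIdx (k * cl.length))[i]'h2
        = (names[i]'hi.1, k * cl.length + i) := by
      rw [List.getElem_zipIdx]
      congr 1
      exact List.getElem_take
    rw [e1, e2]
    dsimp only
    congr 1
    -- heads of the rotated palettes = the closed-form color
    have hmod : (k * cl.length + i) % cl.length = i := by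
      rw [Nat.mul_comm, Nat.mul_add_mod]; exact Nat.mod_eq_of_lt hi.2
    have hdiv : (k * cl.length + i) / cl.length = k := by
      rw [Nat.mul_comm, Nat.mul_add_div hn, Nat.div_eq_of_lt hi.2]; omega
    rw [hmod, hdiv, List.getD_eq_getElem cl [] hi.2]
    have hrl : 0 < (pvRotN k (cl[i]'hi.2)).length := by rw [pvRotN_length]; exact hg0
    rw [List.getD_eq_getElem _ "" hrl, List.getD_eq_getElem _ "" (Nat.mod_lt _ hg0)]
    rw [pvRotN_getElem k _ hgn 0 hg0]
    exact getElem_congr_idx (by rw [Nat.zero_add, Nat.mod_mod_of_dvd _ (dvd_refl _)])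

-- B's loop, with palettes = cl rotated k times, computes the closed-form fold
lemma pvBLoop_eq (cl : List (List String)) (hn : 0 < cl.length) :
    ∀ (fuel : Nat) (names : List String) (k : Nat) (d : PySem.Dict String String),
    names.length ≤ fuel →
    (∀ j, j < cl.length → j < names.length → cl.getD j [] ≠ []) →
    pvBLoop fuel names (cl.map (pvRotN k)) d
      = (names.zipIdx (k * cl.length)).foldl
          (fun d p =>
            let group := cl.getD (p.2 % cl.length) []
            d.insert p.1 (group.getD ((p.2 / cl.length) % group.length) "")) d := by
  intro fuel
  induction fuel with
  | zero =>
    intro names k d hf _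
    have : names = [] := List.eq_nil_of_length_eq_zero (by omega)
    subst this
    simp [pvBLoop]
  | succ f ih =>
    intro names k d hf H
    rcases hcl : cl.map (pvRotN k) with _ | ⟨pl, pls⟩
    · exfalso
      have hh : cl.length = 0 := by simpa using congrArg List.length hcl
      omega
    rcases names with _ | ⟨nm, nms⟩
    · simp [pvBLoop]
    · rw [pvBLoop]
      have hplen : (pl :: pls).length = cl.length := by
        have := congrArg List.length hcl; simpa using this.symm
      rw [← hcl]
      -- the round's fold
      rw [pvChunk cl hn (nm :: nms) k H d]
      -- the recursive call
      rw [hcl, hplen, ← hcl]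
      have hmaprot : (cl.map (pvRotN k)).map pvRot = cl.map (pvRotN (k + 1)) := by
        rw [List.map_map]
        exact List.map_congr_left (fun g _ => pvRot_pvRotN k g)
      rw [hmaprot]
      rw [ih ((nm :: nms).drop cl.length) (k + 1) _
        (by simp only [List.length_drop, List.length_cons] at hf ⊢; omega)
        (fun j hj hlt => H j hj (by
          simp only [List.length_drop, List.length_cons] at hlt ⊢; omega))]
      -- stitch: full zipIdx fold = take-part fold then drop-part fold
      conv_rhs => rw [← List.take_append_drop cl.length (nm :: nms), List.zipIdx_append, List.foldl_append]
      by_cases hd : (nm :: nms).length ≤ cl.length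
      · have : (nm :: nms).drop cl.length = [] := List.drop_eq_nil_of_le hd
        rw [this]
        simp
      · have htl : ((nm :: nms).take cl.length).length = cl.length := by
          rw [List.length_take]; omega
        rw [htl]
        have : k * cl.length + cl.length = (k + 1) * cl.length := by ring
        rw [this]

-- names = L.map Prod.fst: the fold over names equals the fold over the pairs
lemma pvMapFst (cl : List (List String)) :
    ∀ (L : List (String × Int)) (s : Nat) (d : PySem.Dict String String),
    ((L.map Prod.fst).zipIdx s).foldl
        (fun d p =>
          let group := cl.getD (p.2 % cl.length) []
          d.insert p.1 (group.getD ((p.2 / cl.length) % group.length) "")) d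
      = (L.zipIdx s).foldl
          (fun d p =>
            let group := cl.getD (p.2 % cl.length) []
            d.insert p.1.1 (group.getD ((p.2 / cl.length) % group.length) "")) d := by
  intro L
  induction L with
  | nil => intro s d; rfl
  | cons t rest ih =>
    intro s d
    simp only [List.map_cons, List.zipIdx_cons, List.foldl_cons]
    exact ih (s + 1) _

-- ===== VERDICT (by name: the statement is the Claim_ definition above) =====
theorem generate_issues_colors_spec : Claim_equal_generate_issues_colors := by
  intro issues_dict cl_list _ hpre
  unfold Spec_generate_issues_colors generate_issues_colors generate_issues_colors_alt
  dsimp only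
  rcases hpre with hnil | ⟨hcl, hcols⟩
  · subst hnil
    simp [pvALoop, pvBLoop, PySem.List.sorted]
  · have hn : 0 < cl_list.length := List.length_pos_of_ne_nil hcl
    have hzero : (0 : Int) = ((0 % cl_list.length : Nat) : Int) := by
      rw [Nat.zero_mod]; rfl
    rw [show List.replicate cl_list.length (0 : Int) = pvIdx cl_list 0 from (pvIdx_zero cl_list).symm,
      hzero,
      pvLoop_eq cl_list hn _ 0 PySem.Dict.empty
        (fun j hj hlt => hcols j (List.mem_range.mpr hj) (by
          simpa [PySem.List.length_sorted] using hlt)),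
      Option.getD_some]
    -- B side
    have hlenmap : ((PySem.List.sorted issues_dict (fun x => x.2) true).map Prod.fst).length
        = issues_dict.length := by simp [PySem.List.length_sorted]
    conv_rhs => rw [show cl_list = cl_list.map (pvRotN 0) from by
      rw [show cl_list.map (pvRotN 0) = cl_list.map id from List.map_congr_left (fun g _ => pvRotN_zero g), List.map_id]]
    rw [pvBLoop_eq cl_list hn _ _ 0 PySem.Dict.empty le_rfl
      (fun j hj hlt => hcols j (List.mem_range.mpr hj) (by rwa [hlenmap] at hlt))]
    rw [Nat.zero_mul, pvMapFst]
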